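-- pv_equiv track=rewrite | github.com/nevragurses/-Python-Projects | CSE321-HW5/hw5.py | ancientSystem
-- ===== SOURCE A (Python) =====
-- def ancientSystem(arr):
--     n=len(arr)
--     minFirst=min(arr)
--     arr.remove(minFirst)
--     minSecond=min(arr)
--     arr.remove(minSecond)
--     temp=minFirst+minSecond
--     total=temp
--     operation=total
--     i=n-1
--     while i>=2:
--         minimum=min(arr)
--         total=total+minimum
--         arr.remove(minimum)
--         operation=operation+total
--         i=i-1
--     return operation
-- ===== SOURCE B (Python) =====
-- def ancientSystem(arr):
--     # Sort once, then one linear pass accumulating the running total and its sum.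
--     # (Note: unlike A, this does not mutate arr; return value is identical.)
--     s = sorted(arr)
--     total = s[0] + s[1]
--     operation = total
--     for x in s[2:]:
--         total += x
--         operation += total
--     return operation
-- ===== Notes on version B (the rewrite author's own statement) =====
-- stated objective: faster
-- what changed: Replaces the repeated min()+remove() scans of the shrinking list with a single ascending sort followed by one pass that accumulates the running total and the sum of totals; Pre_ excludes lists of fewer than 2 elements, on which A raises ValueError (and B raises IndexError).
import Mathlib
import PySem

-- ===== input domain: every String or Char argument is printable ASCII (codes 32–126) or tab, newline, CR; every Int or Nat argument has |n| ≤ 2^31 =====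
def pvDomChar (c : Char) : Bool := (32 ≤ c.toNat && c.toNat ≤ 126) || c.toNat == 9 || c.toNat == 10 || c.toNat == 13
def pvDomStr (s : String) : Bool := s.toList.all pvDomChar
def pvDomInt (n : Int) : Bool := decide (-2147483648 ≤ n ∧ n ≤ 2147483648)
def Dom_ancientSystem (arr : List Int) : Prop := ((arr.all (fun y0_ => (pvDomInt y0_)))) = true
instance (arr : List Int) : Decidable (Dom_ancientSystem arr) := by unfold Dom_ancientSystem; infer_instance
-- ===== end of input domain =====

-- B sorts once and does one accumulating pass instead of A's repeated min()+remove() scans.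
-- A empties its argument list in place; B does not mutate it — the equivalence is about the return value.

-- ===== PORT A =====
-- A's while loop: i runs from n-1 down to 2, i.e. n-2 iterations; state is (arr, total, operation).
def ancientLoopA : List Int → Int → Int → Nat → Int
  | _, _, operation, 0 => operation
  | arr, total, operation, k + 1 =>
      match PySem.List.min? arr (fun x => x) with
      | none => operation  -- min([]) raises ValueError; unreachable under Pre_
      | some m =>
          ancientLoopA ((PySem.List.remove? arr m).getD arr) (total + m) (operation + (total + m)) k

def ancientSystem (arr : List Int) : Int :=
  let n := arr.length
  match PySem.List.min? arr (fun x => x) with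
  | none => 0  -- min([]) raises ValueError; excluded by Pre_
  | some minFirst =>
    let arr1 := (PySem.List.remove? arr minFirst).getD arr
    match PySem.List.min? arr1 (fun x => x) with
    | none => 0  -- min([]) raises ValueError; excluded by Pre_
    | some minSecond =>
      let arr2 := (PySem.List.remove? arr1 minSecond).getD arr1
      let temp := minFirst + minSecond
      ancientLoopA arr2 temp temp (n - 2)

-- ===== PORT B =====
def ancientLoopB (rest : List Int) (total operation : Int) : Int :=
  (rest.foldl (fun (st : Int × Int) x => (st.1 + x, st.2 + (st.1 + x))) (total, operation)).2

def ancientSystem_alt (arr : List Int) : Int :=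
  match PySem.List.sorted arr (fun x => x) false with
  | a :: b :: rest => ancientLoopB rest (a + b) (a + b)
  | _ => 0  -- s[0]/s[1] raise IndexError on fewer than 2 elements; excluded by Pre_

-- ===== PRECONDITION & SPEC =====
-- Lists with fewer than 2 elements make A raise ValueError (min of an empty list); B raises IndexError.
def Pre_ancientSystem (arr : List Int) : Prop := 2 ≤ arr.length
instance (arr : List Int) : Decidable (Pre_ancientSystem arr) := by unfold Pre_ancientSystem; infer_instance
def pvWitness_ancientSystem : List Int := ([1, 2])

def Spec_ancientSystem (arr : List Int) (out : Int) : Prop := out = ancientSystem_alt arr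
instance (arr : List Int) (out : Int) : Decidable (Spec_ancientSystem arr out) := by unfold Spec_ancientSystem; infer_instance

-- ===== CLAIM (what is proved, stated in full; the proofs are below) =====
def Claim_equal_ancientSystem : Prop := ∀ (arr : List Int), Dom_ancientSystem arr → Pre_ancientSystem arr → Spec_ancientSystem arr (ancientSystem arr)

-- ===== LEMMAS AND PROOFS =====

-- sorted pops the minimum first: sorted xs = m :: sorted (xs.erase m) when m = min xs
theorem sorted_min_cons (xs : List Int) (m : Int)
    (h : PySem.List.min? xs (fun x => x) = some m) :
    PySem.List.sorted xs (fun x => x) false =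
      m :: PySem.List.sorted (xs.erase m) (fun x => x) false := by
  have hmem : m ∈ xs := PySem.List.min?_mem h
  have hmin : ∀ y ∈ xs, m ≤ y := by
    intro y hy
    simpa using PySem.List.min?_id_le h y hy
  apply PySem.List.sorted_id_eq_of_perm_of_pairwise
  · exact ((PySem.List.sorted_perm _ _ _).cons m).trans (List.perm_cons_erase hmem).symm
  · refine List.pairwise_cons.mpr ⟨?_, ?_⟩
    · intro y hy
      exact hmin y (xs.erase_subset ((PySem.List.mem_sorted _ _ _ _).mp hy))
    · simpa using PySem.List.sorted_pairwise (xs := xs.erase m) (key := fun x => x)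

theorem loopA_eq_loopB (k : Nat) : ∀ (arr : List Int), arr.length = k → ∀ (total op : Int),
    ancientLoopA arr total op k =
      ancientLoopB (PySem.List.sorted arr (fun x => x) false) total op := by
  induction k with
  | zero =>
      intro arr h total op
      have : arr = [] := List.eq_nil_of_length_eq_zero h
      subst this
      simp [ancientLoopA, ancientLoopB, PySem.List.sorted]
  | succ k ih =>
      intro arr h total op
      have hne : arr ≠ [] := by intro h0; subst h0; simp at h
      obtain ⟨m, hm⟩ : ∃ m, PySem.List.min? arr (fun x => x) = some m := by
        cases hmin : PySem.List.min? arr (fun x => x) with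
        | none => exact absurd ((PySem.List.min?_eq_none_iff arr (fun x => x)).mp hmin) hne
        | some m => exact ⟨m, rfl⟩
      have hmem : m ∈ arr := PySem.List.min?_mem hm
      have hrem : PySem.List.remove? arr m = some (arr.erase m) :=
        PySem.List.remove?_eq_some_erase arr m hmem
      have hlen : (arr.erase m).length = k := by
        rw [List.length_erase_of_mem hmem, h]; rfl
      have hsorted := sorted_min_cons arr m hm
      rw [ancientLoopA, hm]
      simp only [hrem, Option.getD_some]
      rw [ih (arr.erase m) hlen (total + m) (op + (total + m)), hsorted]
      simp [ancientLoopB]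

-- ===== VERDICT (by name: the statement is the Claim_ definition above) =====
theorem ancientSystem_spec : Claim_equal_ancientSystem := by
  intro arr _ hpre
  unfold Spec_ancientSystem ancientSystem ancientSystem_alt
  obtain ⟨a, rest1, hne⟩ : ∃ a rest1, arr = a :: rest1 := by
    cases arr with
    | nil => simp [Pre_ancientSystem] at hpre
    | cons a t => exact ⟨a, t, rfl⟩
  obtain ⟨m1, hm1⟩ : ∃ m1, PySem.List.min? arr (fun x => x) = some m1 := by
    cases h : PySem.List.min? arr (fun x => x) with
    | none => exact absurd ((PySem.List.min?_eq_none_iff arr (fun x => x)).mp h) (by simp [hne])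
    | some m => exact ⟨m, rfl⟩
  have hmem1 : m1 ∈ arr := PySem.List.min?_mem hm1
  have hrem1 : PySem.List.remove? arr m1 = some (arr.erase m1) :=
    PySem.List.remove?_eq_some_erase arr m1 hmem1
  have hlen1 : (arr.erase m1).length = arr.length - 1 := List.length_erase_of_mem hmem1
  have hne1 : arr.erase m1 ≠ [] := by
    intro h0
    rw [h0] at hlen1
    have hp : 2 ≤ arr.length := hpre
    simp at hlen1
    omega
  obtain ⟨m2, hm2⟩ : ∃ m2, PySem.List.min? (arr.erase m1) (fun x => x) = some m2 := by
    cases h : PySem.List.min? (arr.erase m1) (fun x => x) with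
    | none => exact absurd ((PySem.List.min?_eq_none_iff (arr.erase m1) (fun x => x)).mp h) hne1
    | some m => exact ⟨m, rfl⟩
  have hmem2 : m2 ∈ arr.erase m1 := PySem.List.min?_mem hm2
  have hrem2 : PySem.List.remove? (arr.erase m1) m2 = some ((arr.erase m1).erase m2) :=
    PySem.List.remove?_eq_some_erase (arr.erase m1) m2 hmem2
  have hlen2 : ((arr.erase m1).erase m2).length = arr.length - 2 := by
    rw [List.length_erase_of_mem hmem2, hlen1]; omega
  have hs1 := sorted_min_cons arr m1 hm1
  have hs2 := sorted_min_cons (arr.erase m1) m2 hm2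
  rw [hm1]
  simp only [hrem1, Option.getD_some, hm2, hrem2]
  rw [loopA_eq_loopB (arr.length - 2) _ hlen2, hs1, hs2]
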